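-- pv_equiv track=rewrite | github.com/leowucn/captain | src/learn_english/model/extract.py | get_forward_content
-- ===== SOURCE A (Python) =====
-- def get_forward_content(paragraph):
--     """ extract the content from paragraph between
--      the head of paragraph or the index of symbols
--       like '.', '!' which appear. """
--     res = []
--     for i, c in enumerate(paragraph):
--         if i < 80:
--             res.append(c)
--             continue
--         if c == '.' or c == '!' or c == '?':
--             res.append(c)
--             break
--         res.append(c)
--     return ''.join(res)
-- ===== SOURCE B (Python) =====
-- def get_forward_content(paragraph):
--     """ extract the content from paragraph between
--      the head of paragraph or the index of symbols
--       like '.', '!' which appear. """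
--     candidates = [p for p in (paragraph.find(ch, 80) for ch in '.!?') if p != -1]
--     if not candidates:
--         return paragraph
--     return paragraph[:min(candidates) + 1]
-- ===== Notes on version B (the rewrite author's own statement) =====
-- stated objective: faster
-- what changed: Replaces the per-character accumulator loop with three library find(ch, 80) searches reduced to the smallest non-missing position, followed by a single slice.
import Mathlib
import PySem

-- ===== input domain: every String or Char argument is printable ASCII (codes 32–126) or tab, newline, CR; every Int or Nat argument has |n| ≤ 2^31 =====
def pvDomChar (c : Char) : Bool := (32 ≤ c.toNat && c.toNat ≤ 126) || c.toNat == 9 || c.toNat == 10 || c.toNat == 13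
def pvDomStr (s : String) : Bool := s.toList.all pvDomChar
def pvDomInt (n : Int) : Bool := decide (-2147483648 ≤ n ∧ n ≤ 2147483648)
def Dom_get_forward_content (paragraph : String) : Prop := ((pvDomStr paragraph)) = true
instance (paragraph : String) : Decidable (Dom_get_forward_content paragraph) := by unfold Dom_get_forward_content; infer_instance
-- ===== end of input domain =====

-- B replaces A's per-character accumulator loop with three library find-searches and one slice; measurably faster (C-level search/slice instead of a per-char Python loop).


-- ===== PORT A =====
-- the enumerate loop of A: index i, accumulator res (appended at the back, as Python's res.append)
def pvLoopA : List Char → Nat → List Char → List Char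
  | [], _, res => res
  | c :: rest, i, res =>
    if i < 80 then pvLoopA rest (i + 1) (res ++ [c])
    else if c = '.' ∨ c = '!' ∨ c = '?' then res ++ [c]
    else pvLoopA rest (i + 1) (res ++ [c])

def get_forward_content (paragraph : String) : String :=
  String.ofList (pvLoopA paragraph.toList 0 [])

-- ===== PORT B =====
def get_forward_content_alt (paragraph : String) : String :=
  let candidates := (['.', '!', '?'].map
      (fun ch => PySem.Str.findFrom paragraph (String.ofList [ch]) 80)).filter (fun p => p != -1)
  match PySem.List.min? candidates id with
  | none => paragraph
  | some m => PySem.Str.slice paragraph none (some (m + 1))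

-- ===== PRECONDITION & SPEC =====
def Spec_get_forward_content (paragraph : String) (out : String) : Prop := out = get_forward_content_alt paragraph
instance (paragraph : String) (out : String) : Decidable (Spec_get_forward_content paragraph out) := by unfold Spec_get_forward_content; infer_instance

-- ===== CLAIM (what is proved, stated in full; the proofs are below) =====
def Claim_equal_get_forward_content : Prop := ∀ (paragraph : String), Dom_get_forward_content paragraph → Spec_get_forward_content paragraph (get_forward_content paragraph)

-- ===== LEMMAS AND PROOFS =====

-- the tail behaviour of A's loop once i ≥ 80: cut at the first sentence-ender (inclusive)
def pvScanE : List Char → List Char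
  | [] => []
  | c :: t => if c = '.' ∨ c = '!' ∨ c = '?' then [c] else c :: pvScanE t

-- the smallest non-(-1) first-occurrence index among '.', '!', '?' in d (B's reduction, on the dropped tail)
def pvCmin (d : List Char) : Option Int :=
  PySem.List.min? ((['.', '!', '?'].map (fun c => PySem.Chars.find d [c])).filter (fun p => p != -1)) id

theorem pvLoopA_hi (l : List Char) : ∀ (i : Nat) (res : List Char), 80 ≤ i →
    pvLoopA l i res = res ++ pvScanE l := by
  induction l with
  | nil => intro i res _; simp [pvLoopA, pvScanE]
  | cons c t ih =>
    intro i res hi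
    by_cases he : c = '.' ∨ c = '!' ∨ c = '?' <;>
      simp [pvLoopA, pvScanE, Nat.not_lt.mpr hi, he, ih (i + 1) (res ++ [c]) (by omega)]

theorem pvLoopA_lo (l : List Char) : ∀ (i : Nat) (res : List Char), i ≤ 80 →
    pvLoopA l i res = res ++ l.take (80 - i) ++ pvScanE (l.drop (80 - i)) := by
  induction l with
  | nil => intro i res _; simp [pvLoopA, pvScanE]
  | cons c t ih =>
    intro i res hi
    by_cases hlt : i < 80
    · have h1 : 80 - i = (80 - (i + 1)) + 1 := by omega
      simp only [pvLoopA, if_pos hlt, h1, List.take_succ_cons, List.drop_succ_cons]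
      rw [ih (i + 1) (res ++ [c]) (by omega)]
      simp
    · have hi80 : i = 80 := by omega
      subst hi80
      simp only [Nat.sub_self, List.take_zero, List.drop_zero]
      by_cases he : c = '.' ∨ c = '!' ∨ c = '?'
      · simp [pvLoopA, pvScanE, he]
      · simp [pvLoopA, pvScanE, he, pvLoopA_hi t 81 (res ++ [c]) (by omega)]

theorem get_forward_content_eq (p : String) :
    get_forward_content p =
      String.ofList (p.toList.take 80 ++ pvScanE (p.toList.drop 80)) := by
  rw [get_forward_content, pvLoopA_lo p.toList 0 [] (by omega)]
  simp

-- go returns -1 or an index ≥ its counter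
theorem pv_go_cases (sub : List Char) (t : List Char) : ∀ (k : Nat),
    PySem.Chars.find.go sub t k = -1 ∨ ∃ j : Nat, PySem.Chars.find.go sub t k = (k : Int) + j := by
  induction t with
  | nil =>
    intro k
    by_cases h : sub.isEmpty
    · exact Or.inr ⟨0, by simp [PySem.Chars.find.go, h]⟩
    · exact Or.inl (by simp [PySem.Chars.find.go, h])
  | cons a t ih =>
    intro k
    by_cases hp : sub.isPrefixOf (a :: t)
    · exact Or.inr ⟨0, by simp [PySem.Chars.find.go, hp]⟩
    · rcases ih (k + 1) with h | ⟨j, hj⟩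
      · exact Or.inl (by simp [PySem.Chars.find.go, hp, h])
      · refine Or.inr ⟨j + 1, ?_⟩
        simp only [PySem.Chars.find.go, hp, Bool.false_eq_true, if_false]
        push_cast at hj ⊢
        omega

theorem pv_find_ge (t : List Char) (sub : List Char) : -1 ≤ PySem.Chars.find t sub := by
  rcases pv_go_cases sub t 0 with h | ⟨j, hj⟩
  · simp [PySem.Chars.find, h]
  · simp only [PySem.Chars.find, hj]
    omega

theorem pv_go_shift (sub : List Char) (t : List Char) : ∀ (k : Nat),
    PySem.Chars.find.go sub t k =
      if PySem.Chars.find t sub = -1 then -1 else PySem.Chars.find t sub + k := by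
  induction t with
  | nil =>
    intro k
    by_cases h : sub.isEmpty <;> simp [PySem.Chars.find.go, PySem.Chars.find, h]
  | cons a t ih =>
    intro k
    have hge := pv_find_ge t sub
    by_cases hp : sub.isPrefixOf (a :: t)
    · simp [PySem.Chars.find.go, PySem.Chars.find, hp]
    · simp only [PySem.Chars.find.go, PySem.Chars.find, hp, Bool.false_eq_true, if_false] at *
      rw [ih (k + 1), ih 1]
      split_ifs with h1 h2 h2
      all_goals omega

theorem pv_find_step (a c : Char) (t : List Char) :
    PySem.Chars.find (a :: t) [c] =
      if a = c then 0
      else if PySem.Chars.find t [c] = -1 then -1 else PySem.Chars.find t [c] + 1 := by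
  have hpre : [c].isPrefixOf (a :: t) = (c == a) := by
    simp [List.isPrefixOf]
  by_cases hac : a = c
  · simp [PySem.Chars.find, PySem.Chars.find.go, hac]
  · have : (c == a) = false := by simp [Ne.symm hac]
    simp only [PySem.Chars.find, PySem.Chars.find.go, hpre, this, Bool.false_eq_true, if_false,
      if_neg hac]
    have := pv_go_shift [c] t 1
    simp only [PySem.Chars.find] at this ⊢
    rw [this]
    norm_num

-- foldl lemmas for any function with min?'s accumulator behaviour (instantiated at min?'s own fold function)
theorem pv_foldl_min_shift (f : Option Int → Int → Option Int)
    (hnone : ∀ x, f none x = some x)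
    (hsome : ∀ m x, f (some m) x = if x < m then some x else some m)
    (k : Int) (xs : List Int) : ∀ acc : Option Int,
    List.foldl f (acc.map (· + k)) (xs.map (· + k)) = (List.foldl f acc xs).map (· + k) := by
  induction xs with
  | nil => intro acc; simp
  | cons x t ih =>
    intro acc
    match acc with
    | none =>
      simp only [Option.map_none, List.map_cons, List.foldl_cons, hnone]
      have := ih (some x)
      simpa using this
    | some m =>
      simp only [Option.map_some, List.map_cons, List.foldl_cons, hsome]
      by_cases h : x < m
      · rw [if_pos (by omega : x + k < m + k), if_pos h]
        have := ih (some x); simpa using this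
      · rw [if_neg (by omega : ¬ x + k < m + k), if_neg h]
        have := ih (some m); simpa using this

theorem pv_min?_shift (k : Int) (xs : List Int) :
    PySem.List.min? (xs.map (· + k)) id = (PySem.List.min? xs id).map (· + k) := by
  simp only [PySem.List.min?]
  exact pv_foldl_min_shift _ (by intro x; rfl) (by intro m x; rfl) k xs none

-- shifting the three finds by +1 shifts pvCmin by +1 (the non-ender head case)
theorem pv_filter_map_shift (k : Int) (hk : 0 ≤ k) (xs : List Int) (hall : ∀ x ∈ xs, -1 ≤ x) :
    (xs.map (fun v => if v = -1 then -1 else v + k)).filter (fun p => p != -1) =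
      (xs.filter (fun p => p != -1)).map (· + k) := by
  induction xs with
  | nil => simp
  | cons x t ih =>
    have hx : -1 ≤ x := hall x (by simp)
    have ht : ∀ x ∈ t, -1 ≤ x := fun y hy => hall y (by simp [hy])
    by_cases h : x = -1
    · simp [h, ih ht]
    · have hxk : x + k ≠ -1 := by omega
      simp [h, hxk, ih ht]

-- a fold computing the minimum stays at 0 when 0 occurs and everything is nonnegative
theorem pv_foldl_min_zero (f : Option Int → Int → Option Int)
    (hnone : ∀ x, f none x = some x)
    (hsome : ∀ m x, f (some m) x = if x < m then some x else some m) :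
    ∀ (xs : List Int) (acc : Option Int),
    (∀ x ∈ xs, 0 ≤ x) →
    ((0 ∈ xs ∧ (acc = none ∨ ∃ v, acc = some v ∧ 0 ≤ v)) ∨ acc = some 0) →
    List.foldl f acc xs = some 0 := by
  intro xs
  induction xs with
  | nil =>
    intro acc _ h
    rcases h with ⟨h0, _⟩ | rfl
    · simp at h0
    · rfl
  | cons x t ih =>
    intro acc hnn h
    have hx : 0 ≤ x := hnn x (by simp)
    have hnt : ∀ y ∈ t, 0 ≤ y := fun y hy => hnn y (by simp [hy])
    simp only [List.foldl_cons]
    rcases h with ⟨h0, hacc⟩ | rfl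
    · rcases hacc with rfl | ⟨v, rfl, hv⟩
      · rw [hnone]
        by_cases hx0 : x = 0
        · subst hx0; exact ih (some 0) hnt (Or.inr rfl)
        · have h0t : 0 ∈ t := by
            rcases List.mem_cons.mp h0 with h | h
            · omega
            · exact h
          exact ih (some x) hnt (Or.inl ⟨h0t, Or.inr ⟨x, rfl, hx⟩⟩)
      · rw [hsome]
        by_cases hlt : x < v
        · rw [if_pos hlt]
          by_cases hx0 : x = 0
          · subst hx0; exact ih (some 0) hnt (Or.inr rfl)
          · have h0t : 0 ∈ t := by
              rcases List.mem_cons.mp h0 with h | h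
              · omega
              · exact h
            exact ih (some x) hnt (Or.inl ⟨h0t, Or.inr ⟨x, rfl, hx⟩⟩)
        · rw [if_neg hlt]
          by_cases hv0 : v = 0
          · subst hv0; exact ih (some 0) hnt (Or.inr rfl)
          · have h0t : 0 ∈ t := by
              rcases List.mem_cons.mp h0 with h | h
              · omega
              · exact h
            exact ih (some v) hnt (Or.inl ⟨h0t, Or.inr ⟨v, rfl, hv⟩⟩)
    · rw [hsome, if_neg (by omega : ¬ x < 0)]
      exact ih (some 0) hnt (Or.inr rfl)

theorem pv_min?_zero (xs : List Int) (h0 : 0 ∈ xs) (hge : ∀ x ∈ xs, -1 ≤ x) :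
    PySem.List.min? (xs.filter (fun p => p != -1)) id = some 0 := by
  simp only [PySem.List.min?]
  apply pv_foldl_min_zero _ (by intro x; rfl) (by intro m x; rfl)
  · intro x hx
    rw [List.mem_filter] at hx
    have := hge x hx.1
    have hne : x ≠ -1 := by simpa using hx.2
    omega
  · exact Or.inl ⟨List.mem_filter.mpr ⟨h0, by simp⟩, Or.inl rfl⟩

theorem pvCmin_cons (a : Char) (t : List Char) :
    pvCmin (a :: t) =
      if a = '.' ∨ a = '!' ∨ a = '?' then some 0 else (pvCmin t).map (· + 1) := by
  by_cases he : a = '.' ∨ a = '!' ∨ a = '?'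
  · rw [if_pos he, pvCmin]
    apply pv_min?_zero
    · rcases he with rfl | rfl | rfl <;> simp [pv_find_step]
    · intro x hx
      simp only [List.mem_map] at hx
      obtain ⟨c, _, rfl⟩ := hx
      exact pv_find_ge _ [c]
  · rw [if_neg he]
    push_neg at he
    obtain ⟨h1, h2, h3⟩ := he
    have f1 := pv_find_step a '.' t
    have f2 := pv_find_step a '!' t
    have f3 := pv_find_step a '?' t
    rw [if_neg h1] at f1; rw [if_neg h2] at f2; rw [if_neg h3] at f3
    have : (['.', '!', '?'].map (fun c => PySem.Chars.find (a :: t) [c])) =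
        (['.', '!', '?'].map (fun c => PySem.Chars.find t [c])).map
          (fun v => if v = -1 then -1 else v + 1) := by
      simp [f1, f2, f3]
    rw [pvCmin, this, pv_filter_map_shift 1 (by omega) _
      (by intro x hx; simp only [List.mem_map] at hx; obtain ⟨c, _, rfl⟩ := hx; exact pv_find_ge t [c]),
      pv_min?_shift]
    rfl

theorem pvCmin_none (d : List Char) (h : pvCmin d = none) : pvScanE d = d := by
  induction d with
  | nil => rfl
  | cons a t ih =>
    rw [pvCmin_cons] at h
    by_cases he : a = '.' ∨ a = '!' ∨ a = '?'
    · simp [he] at h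
    · rw [if_neg he] at h
      simp only [Option.map_eq_none_iff] at h
      simp [pvScanE, he, ih h]

theorem pvCmin_some (d : List Char) : ∀ (m : Int), pvCmin d = some m →
    0 ≤ m ∧ pvScanE d = d.take (m.toNat + 1) := by
  induction d with
  | nil =>
    intro m h
    rw [show pvCmin [] = none from by decide] at h
    exact absurd h (by simp)
  | cons a t ih =>
    intro m h
    rw [pvCmin_cons] at h
    by_cases he : a = '.' ∨ a = '!' ∨ a = '?'
    · rw [if_pos he] at h
      simp only [Option.some.injEq] at h
      subst h
      exact ⟨le_refl 0, by simp [pvScanE, he]⟩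
    · rw [if_neg he] at h
      simp only [Option.map_eq_some_iff] at h
      obtain ⟨m', hm', rfl⟩ := h
      obtain ⟨hge, hscan⟩ := ih m' hm'
      refine ⟨by omega, ?_⟩
      have : (m' + 1).toNat = m'.toNat + 1 := by omega
      simp [pvScanE, he, hscan, this]

-- findFrom with start 80 on a short string
theorem pv_findFrom_short (l : List Char) (c : Char) (h : l.length ≤ 80) :
    PySem.Chars.findFrom l [c] 80 = -1 := by
  simp only [PySem.Chars.findFrom]
  norm_num
  intro h80 hne
  exfalso
  have hnil : List.drop (Int.toNat 80) l = [] := by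
    have h8 : l.length = 80 := by omega
    simp [h8]
  rw [hnil] at hne
  exact hne (by simp [PySem.Chars.find, PySem.Chars.find.go])

theorem pv_findFrom_long (l : List Char) (c : Char) (h : 80 ≤ l.length) :
    PySem.Chars.findFrom l [c] 80 =
      if PySem.Chars.find (l.drop 80) [c] = -1 then -1
      else 80 + PySem.Chars.find (l.drop 80) [c] := by
  simp only [PySem.Chars.findFrom]
  norm_num
  rw [if_neg (by omega : ¬ l.length < 80)]
  have ht : Int.toNat 80 = 80 := rfl
  rw [ht]

theorem pv_alt_eq (p : String) :
    get_forward_content_alt p =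
      String.ofList (p.toList.take 80 ++ pvScanE (p.toList.drop 80)) := by
  have htl : ∀ c : Char, (String.ofList [c]).toList = [c] := fun c => String.toList_ofList
  have h1 : get_forward_content_alt p = (match PySem.List.min? ((['.', '!', '?'].map
      (fun ch => PySem.Str.findFrom p (String.ofList [ch]) 80)).filter (fun p => p != -1)) id with
    | none => p
    | some m => PySem.Str.slice p none (some (m + 1))) := rfl
  by_cases hlen : p.toList.length ≤ 80
  · have hd : p.toList.drop 80 = [] := List.drop_eq_nil_of_le hlen
    have hcand : (['.', '!', '?'].map
        (fun ch => PySem.Str.findFrom p (String.ofList [ch]) 80)).filter (fun p => p != -1) = [] := by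
      simp [PySem.Str.findFrom, htl, pv_findFrom_short _ _ hlen]
    rw [h1, hcand]
    simp only [PySem.List.min?, List.foldl_nil]
    rw [hd]
    simp [pvScanE, List.take_of_length_le hlen]
  · push_neg at hlen
    have h80 : 80 ≤ p.toList.length := by omega
    set d := p.toList.drop 80 with hd
    have hmap : (['.', '!', '?'].map (fun ch => PySem.Str.findFrom p (String.ofList [ch]) 80)) =
        (['.', '!', '?'].map (fun c => PySem.Chars.find d [c])).map
          (fun v => if v = -1 then -1 else v + 80) := by
      have e : ∀ v : Int, (if v = -1 then -1 else 80 + v) = (if v = -1 then -1 else v + 80) := by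
        intro v; split_ifs <;> ring
      simp only [List.map_cons, List.map_nil, PySem.Str.findFrom, htl]
      rw [pv_findFrom_long _ _ h80, pv_findFrom_long _ _ h80, pv_findFrom_long _ _ h80]
      simp only [e]
      rw [← hd]
    have hcand : (['.', '!', '?'].map
        (fun ch => PySem.Str.findFrom p (String.ofList [ch]) 80)).filter (fun p => p != -1) =
        ((['.', '!', '?'].map (fun c => PySem.Chars.find d [c])).filter (fun p => p != -1)).map
          (· + 80) := by
      rw [hmap, pv_filter_map_shift 80 (by omega)]
      intro x hx
      simp only [List.mem_map] at hx
      obtain ⟨c, _, rfl⟩ := hx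
      exact pv_find_ge d [c]
    rw [h1, hcand, pv_min?_shift]
    rcases hmin : pvCmin d with _ | m
    · rw [pvCmin] at hmin
      rw [hmin]
      simp only [Option.map_none]
      rw [pvCmin_none d (by rw [pvCmin]; exact hmin)]
      rw [hd, List.take_append_drop]
      exact String.ofList_toList.symm
    · have hmin' := hmin
      rw [pvCmin] at hmin'
      rw [hmin']
      simp only [Option.map_some]
      obtain ⟨hge, hscan⟩ := pvCmin_some d m hmin
      rw [hscan]
      show PySem.Str.slice p none (some (m + 80 + 1)) = _
      rw [PySem.Str.slice]
      rw [show PySem.Chars.slice p.toList none (some (m + 80 + 1)) =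
            PySem.List.slice p.toList none (some (m + 80 + 1)) from rfl]
      rw [PySem.List.slice_to _ (by omega : (0:Int) ≤ m + 80 + 1)]
      congr 1
      have ht : (m + 80 + 1).toNat = 80 + (m.toNat + 1) := by omega
      rw [ht, List.take_add, hd]

-- ===== VERDICT (by name: the statement is the Claim_ definition above) =====
theorem get_forward_content_spec : Claim_equal_get_forward_content := by
  intro p _
  unfold Spec_get_forward_content
  rw [get_forward_content_eq, pv_alt_eq]
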